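-- pv_equiv track=rewrite | github.com/AlejaH1213/Python-practice | challenges.py | solution
-- ===== SOURCE A (Python) =====
-- def solution(queryType, query):
--     #i also need to start creating the hasmhmap
--     hashmap = {}
--     #i have to keep a counter so ill create an empty variable
--     sum = 0
--     #because the query and the querytype have the same lenght i can just use range on one of them
--     for i in range(len(queryType)):
--       if queryType[i] == "insert":
--         hashmap[query[i][0]] = query[i][1]
--       elif queryType[i] == "addToValue":
--           for key in hashmap:
--               hashmap[key] += query[i][0]
--       elif queryType[i] == "addToKey":
--           new_hashmap = {}
--           for key in list(hashmap):
--               new_key = key + query [i][0]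
--               new_hashmap[new_key] = hashmap[key]
--           hashmap = new_hashmap
--       elif queryType[i] == "get":
--         if query[i][0] in hashmap:
--                 sum += hashmap[query[i][0]]
--     return sum
-- ===== SOURCE B (Python) =====
-- def solution(queryType, query):
--     # Lazy global offsets: instead of rewriting every key/value on addToKey /
--     # addToValue, store normalized entries and adjust at insert/get time.
--     stored = {}
--     key_off = 0
--     val_off = 0
--     total = 0
--     for t, q in zip(queryType, query):
--         if t == "insert":
--             stored[q[0] - key_off] = q[1] - val_off
--         elif t == "addToValue":
--             val_off += q[0]
--         elif t == "addToKey":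
--             key_off += q[0]
--         elif t == "get":
--             v = stored.get(q[0] - key_off)
--             if v is not None:
--                 total += v + val_off
--     return total
-- ===== Notes on version B (the rewrite author's own statement) =====
-- stated objective: faster
-- what changed: Replaces A's per-query rewrite of the whole hashmap on addToKey/addToValue with two lazy global offsets (keys/values stored normalized, adjusted only at insert/get), making every query O(1); intended as faster (asymptotic), measured 1.6x-4.7x at the largest timed size depending on the run.
-- outside the precondition, e.g. on solution(['insert'], [[5]]): A raises IndexError, B raises IndexError; on solution(['addToValue'], [[]]): A returns 0, B raises IndexError
import Mathlib
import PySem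

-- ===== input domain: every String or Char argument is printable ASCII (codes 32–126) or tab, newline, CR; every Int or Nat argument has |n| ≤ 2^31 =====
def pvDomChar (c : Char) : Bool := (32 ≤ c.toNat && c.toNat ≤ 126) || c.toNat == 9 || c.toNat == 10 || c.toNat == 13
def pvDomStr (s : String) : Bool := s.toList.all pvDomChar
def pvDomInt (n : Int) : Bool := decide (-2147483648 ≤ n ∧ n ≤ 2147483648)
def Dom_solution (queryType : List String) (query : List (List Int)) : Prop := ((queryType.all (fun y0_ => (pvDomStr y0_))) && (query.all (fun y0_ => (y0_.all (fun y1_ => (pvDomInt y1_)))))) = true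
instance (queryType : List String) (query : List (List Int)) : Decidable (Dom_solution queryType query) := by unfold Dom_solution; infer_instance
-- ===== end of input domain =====

-- B replaces A's per-query rewrite of the whole hashmap on addToKey/addToValue with two
-- lazy global offsets, O(1) per query.

-- ===== PORT A =====
-- the body of A's `for i in range(len(queryType))` loop
def pvStepA (queryType : List String) (query : List (List Int))
    (st : PySem.Dict Int Int × Int) (i : Int) : PySem.Dict Int Int × Int :=
  if PySem.List.pyGetD queryType i "" = "insert" then
    (st.1.insert (PySem.List.pyGetD (PySem.List.pyGetD query i []) 0 0)
                 (PySem.List.pyGetD (PySem.List.pyGetD query i []) 1 0), st.2)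
  else if PySem.List.pyGetD queryType i "" = "addToValue" then
    (st.1.keys.foldl
      (fun h k => h.modify k 0 (fun v => v + PySem.List.pyGetD (PySem.List.pyGetD query i []) 0 0))
      st.1, st.2)
  else if PySem.List.pyGetD queryType i "" = "addToKey" then
    (st.1.keys.foldl
      (fun h k => h.insert (k + PySem.List.pyGetD (PySem.List.pyGetD query i []) 0 0) (st.1.getD k 0))
      PySem.Dict.empty, st.2)
  else if PySem.List.pyGetD queryType i "" = "get" then
    (st.1,
     if st.1.contains (PySem.List.pyGetD (PySem.List.pyGetD query i []) 0 0) then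
       st.2 + st.1.getD (PySem.List.pyGetD (PySem.List.pyGetD query i []) 0 0) 0
     else st.2)
  else st

def solution (queryType : List String) (query : List (List Int)) : Int :=
  ((PySem.List.pyRange 0 (queryType.length : Int)).foldl (pvStepA queryType query)
    (PySem.Dict.empty, 0)).2

-- ===== PORT B =====
-- the body of B's `for t, q in zip(queryType, query)` loop
def pvStepB (st : PySem.Dict Int Int × Int × Int × Int) (tq : String × List Int) :
    PySem.Dict Int Int × Int × Int × Int :=
  if tq.1 = "insert" then
    (st.1.insert (PySem.List.pyGetD tq.2 0 0 - st.2.1) (PySem.List.pyGetD tq.2 1 0 - st.2.2.1),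
     st.2.1, st.2.2.1, st.2.2.2)
  else if tq.1 = "addToValue" then
    (st.1, st.2.1, st.2.2.1 + PySem.List.pyGetD tq.2 0 0, st.2.2.2)
  else if tq.1 = "addToKey" then
    (st.1, st.2.1 + PySem.List.pyGetD tq.2 0 0, st.2.2.1, st.2.2.2)
  else if tq.1 = "get" then
    match st.1.get? (PySem.List.pyGetD tq.2 0 0 - st.2.1) with
    | some v => (st.1, st.2.1, st.2.2.1, st.2.2.2 + v + st.2.2.1)
    | none => st
  else st

def solution_alt (queryType : List String) (query : List (List Int)) : Int :=
  ((queryType.zip query).foldl pvStepB (PySem.Dict.empty, 0, 0, 0)).2.2.2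

-- ===== PRECONDITION & SPEC =====
-- Pre_ excludes queries whose argument list is missing or shorter than their query type
-- needs: there Python A either raises IndexError or (only when its hashmap happens to be
-- empty, so the operand is never read) returns, while B reads the operand eagerly and
-- raises IndexError.
def Pre_solution (queryType : List String) (query : List (List Int)) : Prop :=
  ∀ i : Nat, i < queryType.length →
    (queryType.getD i "" = "insert" → 2 ≤ (query.getD i []).length) ∧
    ((queryType.getD i "" = "addToValue" ∨ queryType.getD i "" = "addToKey" ∨
      queryType.getD i "" = "get") → 1 ≤ (query.getD i []).length)
instance (queryType : List String) (query : List (List Int)) : Decidable (Pre_solution queryType query) := by unfold Pre_solution; infer_instance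

def pvWitness_solution : List String × List (List Int) :=
  (["insert", "addToKey", "addToValue", "get", "noop"], [[1, 2], [3], [4], [4], []])

def Spec_solution (queryType : List String) (query : List (List Int)) (out : Int) : Prop := out = solution_alt queryType query
instance (queryType : List String) (query : List (List Int)) (out : Int) : Decidable (Spec_solution queryType query out) := by unfold Spec_solution; infer_instance

-- ===== CLAIM (what is proved, stated in full; the proofs are below) =====
def Claim_equal_solution : Prop := ∀ (queryType : List String) (query : List (List Int)), Dom_solution queryType query → Pre_solution queryType query → Spec_solution queryType query (solution queryType query)

-- ===== LEMMAS AND PROOFS =====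

-- the relation between A's hashmap entries and B's normalized entries
def pvShift (ko vo : Int) (p : Int × Int) : Int × Int := (p.1 + ko, p.2 + vo)

-- structural reference form of A's indexed loop body
def pvStepA' (t : String) (q : List Int) (st : PySem.Dict Int Int × Int) :
    PySem.Dict Int Int × Int :=
  if t = "insert" then
    (st.1.insert (PySem.List.pyGetD q 0 0) (PySem.List.pyGetD q 1 0), st.2)
  else if t = "addToValue" then
    (st.1.keys.foldl (fun h k => h.modify k 0 (fun v => v + PySem.List.pyGetD q 0 0)) st.1, st.2)
  else if t = "addToKey" then
    (st.1.keys.foldl (fun h k => h.insert (k + PySem.List.pyGetD q 0 0) (st.1.getD k 0))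
      PySem.Dict.empty, st.2)
  else if t = "get" then
    (st.1,
     if st.1.contains (PySem.List.pyGetD q 0 0) then
       st.2 + st.1.getD (PySem.List.pyGetD q 0 0) 0
     else st.2)
  else st

def pvRunA : List String → List (List Int) → (PySem.Dict Int Int × Int) → (PySem.Dict Int Int × Int)
  | [], _, st => st
  | t :: ts, qs, st => pvRunA ts qs.tail (pvStepA' t (qs.headD []) st)

lemma pvGetD_succ {α : Type} (qs : List α) (i : Nat) (d : α) :
    qs.getD (i + 1) d = qs.tail.getD i d := by
  cases qs <;> simp

lemma pvGetD_zero {α : Type} (qs : List α) (d : α) : qs.getD 0 d = qs.headD d := by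
  cases qs <;> simp

lemma pvStepA_succ (t : String) (ts : List String) (q : List (List Int))
    (st : PySem.Dict Int Int × Int) (i : Nat) :
    pvStepA (t :: ts) q st ((i + 1 : Nat) : Int) = pvStepA ts q.tail st ((i : Nat) : Int) := by
  simp only [pvStepA, PySem.List.pyGetD_natCast, pvGetD_succ, List.tail_cons]

lemma pvStepA_zero (t : String) (ts : List String) (q : List (List Int))
    (st : PySem.Dict Int Int × Int) :
    pvStepA (t :: ts) q st (((0 : Nat) : Int)) = pvStepA' t (q.headD []) st := by
  simp only [pvStepA, pvStepA', PySem.List.pyGetD_natCast, pvGetD_zero,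
      List.headD_cons]

lemma pvBridgeA : ∀ (qt : List String) (q : List (List Int)) (st : PySem.Dict Int Int × Int),
    (PySem.List.pyRange 0 (qt.length : Int)).foldl (pvStepA qt q) st = pvRunA qt q st := by
  intro qt
  induction qt with
  | nil => intro q st; simp [PySem.List.pyRange, pvRunA]
  | cons t ts ih =>
    intro q st
    rw [PySem.List.pyRange_zero_natCast, List.foldl_map]
    rw [List.length_cons, List.range_succ_eq_map, List.foldl_cons, List.foldl_map]
    have hfun : (fun (st : PySem.Dict Int Int × Int) (i : Nat) => pvStepA (t :: ts) q st ((i.succ : Nat) : Int))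
        = fun st i => pvStepA ts q.tail st ((i : Nat) : Int) := by
      funext st i; exact pvStepA_succ t ts q st i
    rw [hfun, pvStepA_zero]
    have h := ih q.tail (pvStepA' t (q.headD []) st)
    rw [PySem.List.pyRange_zero_natCast, List.foldl_map] at h
    rw [h, pvRunA]

-- contains / get? / insert through the shift relation
lemma pvContains_shift (l : List (Int × Int)) (ko vo k : Int) :
    (PySem.Dict.mk (l.map (pvShift ko vo))).contains k = (PySem.Dict.mk l).contains (k - ko) := by
  induction l with
  | nil => rfl
  | cons p rest ih =>
    simp only [PySem.Dict.contains, List.map_cons, List.any_cons] at *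
    rw [show ((pvShift ko vo p).1 == k) = (p.1 == k - ko) by
          simp only [pvShift]; by_cases h : p.1 = k - ko <;> simp [h] <;> omega, ih]

lemma pvGet?_shift (l : List (Int × Int)) (ko vo k : Int) :
    (PySem.Dict.mk (l.map (pvShift ko vo))).get? k
      = ((PySem.Dict.mk l).get? (k - ko)).map (fun v => v + vo) := by
  induction l with
  | nil => rfl
  | cons p rest ih =>
    simp only [PySem.Dict.get?, List.map_cons, List.find?_cons] at *
    by_cases h : p.1 = k - ko
    · have h1 : (p.1 + ko == k) = true := by simp; omega
      have h2 : (p.1 == k - ko) = true := by simp [h]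
      simp only [pvShift, h1, h2]
      simp
    · have h1 : (p.1 + ko == k) = false := by simp; omega
      have h2 : (p.1 == k - ko) = false := by simp [h]
      simp only [pvShift, h1, h2]
      exact ih

lemma pvInsert_shift (l : List (Int × Int)) (ko vo k v : Int) :
    (PySem.Dict.mk (l.map (pvShift ko vo))).insert k v
      = PySem.Dict.mk (((PySem.Dict.mk l).insert (k - ko) (v - vo)).items.map (pvShift ko vo)) := by
  simp only [PySem.Dict.insert, pvContains_shift]
  by_cases h : (PySem.Dict.mk l).contains (k - ko) = true
  · simp only [h, if_true, List.map_map]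
    congr 1
    apply List.map_congr_left
    intro p _
    by_cases hp : p.1 = k - ko
    · have h2 : (p.1 == k - ko) = true := by simp [hp]
      simp [Function.comp, h2, pvShift, Prod.ext_iff]
      omega
    · have h1 : ((pvShift ko vo p).1 == k) = false := by simp [pvShift]; omega
      have h2 : (p.1 == k - ko) = false := by simp [hp]
      simp [Function.comp, h1, h2]
  · simp only [h]
    simp [pvShift]

-- A's addToValue loop over the dict's own (nodup) keys adds x to every value
lemma pvAddVal_aux (x : Int) : ∀ (post pre : List (Int × Int)),
    ((pre ++ post).map Prod.fst).Nodup →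
    (post.map Prod.fst).foldl (fun h k => h.modify k 0 (fun v => v + x))
        (PySem.Dict.mk (pre.map (fun p => (p.1, p.2 + x)) ++ post))
      = PySem.Dict.mk ((pre ++ post).map (fun p => (p.1, p.2 + x))) := by
  intro post
  induction post with
  | nil => intro pre _; simp
  | cons p rest ih =>
    intro pre hnd
    have hsplit : (pre.map Prod.fst).Nodup ∧ (p.1 :: rest.map Prod.fst).Nodup ∧
        ∀ a ∈ pre.map Prod.fst, ∀ b ∈ p.1 :: rest.map Prod.fst, a ≠ b := by
      have h := hnd
      simp only [List.map_append, List.map_cons] at h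
      exact List.nodup_append.mp h
    have hk_pre : ∀ q ∈ pre, q.1 ≠ p.1 := by
      intro q hq
      exact hsplit.2.2 q.1 (List.mem_map_of_mem hq) p.1 (by simp)
    have hk_rest : ∀ q ∈ rest, q.1 ≠ p.1 := by
      intro q hq heq
      exact (List.nodup_cons.mp hsplit.2.1).1 (heq ▸ List.mem_map_of_mem hq)
    have hstep : (PySem.Dict.mk (pre.map (fun p => (p.1, p.2 + x)) ++ p :: rest)).modify p.1 0 (fun v => v + x)
        = PySem.Dict.mk ((pre ++ [p]).map (fun p => (p.1, p.2 + x)) ++ rest) := by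
      have hfind_pre : (pre.map (fun p => (p.1, p.2 + x))).find? (fun q => q.1 == p.1) = none := by
        rw [List.find?_eq_none]
        intro q hq
        obtain ⟨q', hq', rfl⟩ := List.mem_map.mp hq
        simp [hk_pre q' hq']
      have hget : (PySem.Dict.mk (pre.map (fun p => (p.1, p.2 + x)) ++ p :: rest)).getD p.1 0 = p.2 := by
        simp [PySem.Dict.getD, PySem.Dict.get?, List.find?_append, hfind_pre]
      have hcont : (PySem.Dict.mk (pre.map (fun p => (p.1, p.2 + x)) ++ p :: rest)).contains p.1 = true := by
        simp [PySem.Dict.contains]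
      simp only [PySem.Dict.modify, PySem.Dict.insert, hcont, if_true, hget]
      congr 1
      simp only [List.map_append, List.map_cons, List.map_nil]
      rw [List.append_assoc]
      congr 1
      · rw [List.map_map]
        conv_rhs => rw [show pre.map (fun p => (p.1, p.2 + x))
            = (pre.map (fun p => (p.1, p.2 + x))).map id by simp, List.map_map]
        apply List.map_congr_left
        intro q hq
        simp [Function.comp, hk_pre q hq]
      · simp only [List.map_cons, List.singleton_append, List.cons.injEq]
        refine ⟨by simp, ?_⟩
        conv_rhs => rw [show rest = rest.map id by simp]
        apply List.map_congr_left
        intro q hq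
        simp [hk_rest q hq]
    rw [List.map_cons, List.foldl_cons, hstep,
        ih (pre ++ [p]) (by simpa [List.append_assoc] using hnd)]
    simp [List.append_assoc]

lemma pvAddVal (d : PySem.Dict Int Int) (x : Int) (h : d.keys.Nodup) :
    d.keys.foldl (fun h k => h.modify k 0 (fun v => v + x)) d
      = PySem.Dict.mk (d.items.map (fun p => (p.1, p.2 + x))) := by
  have haux := pvAddVal_aux x d.items []
  simp only [List.nil_append, List.map_nil] at haux
  exact haux h

-- A's addToKey loop rebuilds the dict with every key shifted by x
lemma pvAddKey (d : PySem.Dict Int Int) (x : Int) (h : d.keys.Nodup) :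
    d.keys.foldl (fun h k => h.insert (k + x) (d.getD k 0)) PySem.Dict.empty
      = PySem.Dict.mk (d.items.map (fun p => (p.1 + x, p.2))) := by
  apply PySem.Dict.ext
  rw [PySem.Dict.items_foldl_insert_fresh (k := fun a => a + x) (v := fun a => d.getD a 0)
      (d := PySem.Dict.empty) (l := d.keys)
      (by intro a _; exact PySem.Dict.contains_empty _)
      (h.map (fun a b hab => by omega))]
  show d.keys.map (fun a => (a + x, d.getD a 0)) = d.items.map (fun p => (p.1 + x, p.2))
  show (d.items.map (fun p => p.1)).map (fun a => (a + x, d.getD a 0)) = _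
  rw [List.map_map]
  apply List.map_congr_left
  intro p hp
  simp only [Function.comp]
  have hgd : d.getD p.1 0 = p.2 := PySem.Dict.getD_of_mem_items d (by simpa using hp) h 0
  rw [hgd]

lemma pvKeys_shift (l : List (Int × Int)) (ko vo : Int) :
    (PySem.Dict.mk (l.map (pvShift ko vo))).keys = (PySem.Dict.mk l).keys.map (fun k => k + ko) := by
  show (l.map (pvShift ko vo)).map (fun p => p.1) = (l.map (fun p => p.1)).map (fun k => k + ko)
  simp [List.map_map, Function.comp, pvShift]

lemma pvPre_tail (t : String) (ts : List String) (q : List (List Int))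
    (h : Pre_solution (t :: ts) q) : Pre_solution ts q.tail := by
  intro i hi
  have := h (i + 1) (by simpa using Nat.succ_lt_succ hi)
  simpa [pvGetD_succ] using this

-- main invariant: A's run on the shifted dict tracks B's run
lemma pvMain : ∀ (qt : List String) (q : List (List Int)) (dB : PySem.Dict Int Int) (ko vo s : Int),
    Pre_solution qt q → dB.keys.Nodup →
    pvRunA qt q (PySem.Dict.mk (dB.items.map (pvShift ko vo)), s)
      = ((fun r => (PySem.Dict.mk (r.1.items.map (pvShift r.2.1 r.2.2.1)), r.2.2.2))
          ((qt.zip q).foldl pvStepB (dB, ko, vo, s))) := by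
  intro qt
  induction qt with
  | nil => intro q dB ko vo s _ _; simp [pvRunA]
  | cons t ts ih =>
    intro q dB ko vo s hpre hnd
    have hmapnd : (PySem.Dict.mk (dB.items.map (pvShift ko vo))).keys.Nodup := by
      rw [pvKeys_shift]
      exact hnd.map (fun a b hab => by omega)
    cases q with
    | nil =>
      have h0 := hpre 0 (by simp)
      simp only [List.getD_cons_zero, List.getD_nil, List.length_nil] at h0
      have hni : t ≠ "insert" := fun hh => by have := h0.1 hh; omega
      have hnv : t ≠ "addToValue" := fun hh => by have := h0.2 (Or.inl hh); omega
      have hnk : t ≠ "addToKey" := fun hh => by have := h0.2 (Or.inr (Or.inl hh)); omega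
      have hng : t ≠ "get" := fun hh => by have := h0.2 (Or.inr (Or.inr hh)); omega
      rw [pvRunA]
      simp only [List.headD_nil, List.tail_nil]
      rw [show pvStepA' t [] (PySem.Dict.mk (dB.items.map (pvShift ko vo)), s)
            = (PySem.Dict.mk (dB.items.map (pvShift ko vo)), s) from by
          simp [pvStepA', hni, hnv, hnk, hng]]
      rw [ih [] dB ko vo s (by simpa using pvPre_tail t ts [] hpre) hnd]
      simp [List.zip_nil_right]
    | cons qh qrest =>
      have hpre' : Pre_solution ts qrest := by simpa using pvPre_tail t ts (qh :: qrest) hpre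
      rw [pvRunA]
      simp only [List.headD_cons, List.tail_cons, List.zip_cons_cons, List.foldl_cons]
      by_cases h1 : t = "insert"
      · have hB : pvStepB (dB, ko, vo, s) (t, qh)
            = (dB.insert (PySem.List.pyGetD qh 0 0 - ko) (PySem.List.pyGetD qh 1 0 - vo), ko, vo, s) := by
          simp [pvStepB, h1]
        have hA : pvStepA' t qh (PySem.Dict.mk (dB.items.map (pvShift ko vo)), s)
            = (PySem.Dict.mk ((dB.insert (PySem.List.pyGetD qh 0 0 - ko)
                (PySem.List.pyGetD qh 1 0 - vo)).items.map (pvShift ko vo)), s) := by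
          simp only [pvStepA', h1, if_true]
          rw [pvInsert_shift]
        rw [hA, hB]
        exact ih qrest _ ko vo s hpre' (PySem.Dict.nodup_keys_insert _ _ _ hnd)
      · by_cases h2 : t = "addToValue"
        · have hB : pvStepB (dB, ko, vo, s) (t, qh)
              = (dB, ko, vo + PySem.List.pyGetD qh 0 0, s) := by
            simp [pvStepB, h2]
          have hA : pvStepA' t qh (PySem.Dict.mk (dB.items.map (pvShift ko vo)), s)
              = (PySem.Dict.mk (dB.items.map (pvShift ko (vo + PySem.List.pyGetD qh 0 0))), s) := by
            simp only [pvStepA']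
            rw [if_neg h1, if_pos h2]
            rw [pvAddVal _ _ hmapnd]
            refine congrArg (fun d => (d, s)) ?_
            refine congrArg PySem.Dict.mk ?_
            rw [List.map_map]
            apply List.map_congr_left
            intro p _
            simp [pvShift, Prod.ext_iff]
            omega
          rw [hA, hB]
          exact ih qrest dB ko _ s hpre' hnd
        · by_cases h3 : t = "addToKey"
          · have hB : pvStepB (dB, ko, vo, s) (t, qh)
                = (dB, ko + PySem.List.pyGetD qh 0 0, vo, s) := by
              simp [pvStepB, h3]
            have hA : pvStepA' t qh (PySem.Dict.mk (dB.items.map (pvShift ko vo)), s)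
                = (PySem.Dict.mk (dB.items.map (pvShift (ko + PySem.List.pyGetD qh 0 0) vo)), s) := by
              simp only [pvStepA']
              rw [if_neg h1, if_neg h2, if_pos h3]
              rw [pvAddKey _ _ hmapnd]
              refine congrArg (fun d => (d, s)) ?_
              refine congrArg PySem.Dict.mk ?_
              rw [List.map_map]
              apply List.map_congr_left
              intro p _
              simp [pvShift, Prod.ext_iff]
              omega
            rw [hA, hB]
            exact ih qrest dB _ vo s hpre' hnd
          · by_cases h4 : t = "get"
            · cases hg : dB.get? (PySem.List.pyGetD qh 0 0 - ko) with
              | none =>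
                have hcont : (PySem.Dict.mk (dB.items.map (pvShift ko vo))).contains
                    (PySem.List.pyGetD qh 0 0) = false := by
                  rw [pvContains_shift, PySem.Dict.contains_eq_isSome_get?, hg]
                  rfl
                have hB : pvStepB (dB, ko, vo, s) (t, qh) = (dB, ko, vo, s) := by
                  simp [pvStepB, h4, hg]
                have hA : pvStepA' t qh (PySem.Dict.mk (dB.items.map (pvShift ko vo)), s)
                    = (PySem.Dict.mk (dB.items.map (pvShift ko vo)), s) := by
                  simp only [pvStepA']
                  rw [if_neg h1, if_neg h2, if_neg h3, if_pos h4]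
                  simp [hcont]
                rw [hA, hB]
                exact ih qrest dB ko vo s hpre' hnd
              | some v =>
                have hcont : (PySem.Dict.mk (dB.items.map (pvShift ko vo))).contains
                    (PySem.List.pyGetD qh 0 0) = true := by
                  rw [pvContains_shift, PySem.Dict.contains_eq_isSome_get?, hg]
                  rfl
                have hgd : (PySem.Dict.mk (dB.items.map (pvShift ko vo))).getD
                    (PySem.List.pyGetD qh 0 0) 0 = v + vo := by
                  rw [PySem.Dict.getD_eq_get?_getD, pvGet?_shift, hg]
                  rfl
                have hB : pvStepB (dB, ko, vo, s) (t, qh) = (dB, ko, vo, s + v + vo) := by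
                  simp [pvStepB, h4, hg]
                have hA : pvStepA' t qh (PySem.Dict.mk (dB.items.map (pvShift ko vo)), s)
                    = (PySem.Dict.mk (dB.items.map (pvShift ko vo)), s + v + vo) := by
                  simp only [pvStepA']
                  rw [if_neg h1, if_neg h2, if_neg h3, if_pos h4]
                  simp only [hcont, if_true, hgd, Prod.mk.injEq]
                  exact ⟨trivial, by omega⟩
                rw [hA, hB]
                exact ih qrest dB ko vo _ hpre' hnd
            · have hB : pvStepB (dB, ko, vo, s) (t, qh) = (dB, ko, vo, s) := by
                simp [pvStepB, h1, h2, h3, h4]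
              have hA : pvStepA' t qh (PySem.Dict.mk (dB.items.map (pvShift ko vo)), s)
                  = (PySem.Dict.mk (dB.items.map (pvShift ko vo)), s) := by
                simp [pvStepA', h1, h2, h3, h4]
              rw [hA, hB]
              exact ih qrest dB ko vo s hpre' hnd

-- ===== VERDICT (by name: the statement is the Claim_ definition above) =====
theorem solution_spec : Claim_equal_solution := by
  unfold Claim_equal_solution
  intro qt q _ hpre
  unfold Spec_solution solution solution_alt
  rw [pvBridgeA]
  rw [show (PySem.Dict.empty : PySem.Dict Int Int) = PySem.Dict.mk [] from rfl]
  have h := pvMain qt q (PySem.Dict.mk []) 0 0 0 hpre (by simp [PySem.Dict.keys])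
  simp only [List.map_nil] at h
  rw [h]
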